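-- pv_equiv track=rewrite | github.com/its-anaehm/Proyecto-Bases | Código/Core/MySQLEngineBackUp.py | purgeData
-- ===== SOURCE A (Python) =====
-- def purgeData(data1, data2 = {}) -> dict:
--     neededData = ["host","port","user","password","database"]
--     verifiedData = {}
--
--     for i in neededData:
--         if i in data1:
--             verifiedData[i] = data1[i]
--
--         if i in data2:
--             verifiedData[i] = data2[i]
--
--         if not i in data1 and not i in data2:
--             return {}
--
--     return verifiedData
-- ===== SOURCE B (Python) =====
-- def purgeData(data1, data2 = {}) -> dict:
--     needed = ("host", "port", "user", "password", "database")
--     found = {}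
--     # scan the INPUT entries (data2 first so its values take precedence via first-wins setdefault)
--     for src in (data2, data1):
--         for k, v in src.items():
--             if k in needed:
--                 found.setdefault(k, v)
--     # completeness by cardinality: found's keys are a subset of the 5 needed keys
--     if len(found) < len(needed):
--         return {}
--     return {k: found[k] for k in needed}
-- ===== Notes on version B (the rewrite author's own statement) =====
-- stated objective: alternative
-- what changed: A loops over the five needed keys probing both dicts with early return; B instead scans the input dicts' items (data2 first, first-wins setdefault giving data2 precedence), filters to needed keys, decides completeness by cardinality (len(found) < 5), and reorders with one comprehension.
import Mathlib
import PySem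

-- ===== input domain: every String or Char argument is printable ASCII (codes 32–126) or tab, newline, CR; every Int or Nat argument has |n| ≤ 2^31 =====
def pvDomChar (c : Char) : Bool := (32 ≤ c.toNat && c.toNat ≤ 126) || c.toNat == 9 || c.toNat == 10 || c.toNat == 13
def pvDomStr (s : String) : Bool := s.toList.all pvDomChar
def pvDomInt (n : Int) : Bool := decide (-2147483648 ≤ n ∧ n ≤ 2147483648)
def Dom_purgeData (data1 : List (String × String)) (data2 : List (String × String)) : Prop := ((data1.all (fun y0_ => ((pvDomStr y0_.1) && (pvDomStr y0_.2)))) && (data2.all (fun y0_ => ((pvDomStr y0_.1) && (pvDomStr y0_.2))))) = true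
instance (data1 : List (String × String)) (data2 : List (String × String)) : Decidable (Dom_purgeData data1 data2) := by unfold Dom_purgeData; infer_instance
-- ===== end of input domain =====

-- B scans the input dicts' items (data2 first, first-wins setdefault), filters to the needed
-- keys, checks completeness by cardinality and reorders — an alternative, data-driven algorithm.


-- ===== PORT A =====
-- A's loop over the needed keys: insert data1's value, overwrite with data2's,
-- early-return {} when a key is in neither dict. Dict membership/lookup on the
-- association-list inputs is first-match (List.lookup).
def purgeGoA (data1 data2 : List (String × String)) :
    List String → PySem.Dict String String → PySem.Dict String String
  | [], verifiedData => verifiedData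
  | i :: rest, verifiedData =>
    let v1 := match List.lookup i data1 with
      | some v => verifiedData.insert i v
      | none => verifiedData
    let v2 := match List.lookup i data2 with
      | some v => v1.insert i v
      | none => v1
    -- `if not i in data1 and not i in data2: return {}` (membership = lookup succeeds)
    match List.lookup i data1, List.lookup i data2 with
    | none, none => PySem.Dict.empty
    | _, _ => purgeGoA data1 data2 rest v2

def purgeData (data1 : List (String × String)) (data2 : List (String × String)) : List (String × String) :=
  (purgeGoA data1 data2 ["host", "port", "user", "password", "database"] PySem.Dict.empty).items

-- ===== PORT B =====
def pvNeeded : List String := ["host", "port", "user", "password", "database"]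

-- one item (k, v) of a source dict: keep it via first-wins setdefault when k is needed
def pvStep (a : PySem.Dict String String) (p : String × String) : PySem.Dict String String :=
  if p.1 ∈ pvNeeded then a.setdefault p.1 p.2 else a

-- B: scan data2's items first, then data1's (so data2's values take precedence under
-- first-wins setdefault); completeness by cardinality; reorder by the needed list.
-- The "" default of getD is unreachable: the size check guarantees every needed key is present.
def purgeData_alt (data1 : List (String × String)) (data2 : List (String × String)) : List (String × String) :=
  let found := data1.foldl pvStep (data2.foldl pvStep PySem.Dict.empty)
  if found.size < pvNeeded.length then []
  else pvNeeded.map (fun k => (k, found.getD k ""))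

-- ===== PRECONDITION & SPEC =====
def Spec_purgeData (data1 : List (String × String)) (data2 : List (String × String)) (out : List (String × String)) : Prop := out = purgeData_alt data1 data2
instance (data1 : List (String × String)) (data2 : List (String × String)) (out : List (String × String)) : Decidable (Spec_purgeData data1 data2 out) := by unfold Spec_purgeData; infer_instance

-- ===== CLAIM =====
def Claim_equal_purgeData : Prop := ∀ (data1 : List (String × String)) (data2 : List (String × String)), Dom_purgeData data1 data2 → Spec_purgeData data1 data2 (purgeData data1 data2)

-- ===== LEMMAS AND PROOFS =====

-- the value A ends up with at key k (when k is not missing): data2 wins, else data1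
def pvPick (data1 data2 : List (String × String)) (k : String) : String :=
  match List.lookup k data2 with
  | some v => v
  | none => (List.lookup k data1).getD ""

-- A's loop equals: empty dict if some key is missing from both, else a fold of
-- inserts of the (data2-precedence) picked values.
lemma purgeGoA_eq (data1 data2 : List (String × String)) :
    ∀ (ks : List String) (acc : PySem.Dict String String),
      purgeGoA data1 data2 ks acc =
        if ks.any (fun k => (List.lookup k data1).isNone && (List.lookup k data2).isNone) then
          PySem.Dict.empty
        else ks.foldl (fun a k => a.insert k (pvPick data1 data2 k)) acc := by
  intro ks
  induction ks with
  | nil => intro acc; simp [purgeGoA]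
  | cons i rest ih =>
    intro acc
    have hany : ((i :: rest).any
          (fun k => (List.lookup k data1).isNone && (List.lookup k data2).isNone) = true) ↔
        (((List.lookup i data1).isNone && (List.lookup i data2).isNone) = true ∨
          rest.any (fun k => (List.lookup k data1).isNone && (List.lookup k data2).isNone) = true) := by
      simp
    cases h1 : List.lookup i data1 <;> cases h2 : List.lookup i data2
    case none.none =>
      simp only [purgeGoA, h1, h2]
      rw [if_pos (hany.mpr (Or.inl (by rw [h1, h2]; rfl)))]
    all_goals
      simp only [purgeGoA, h1, h2]
      rw [ih]
      have hcond : ((List.lookup i data1).isNone && (List.lookup i data2).isNone) = false := by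
        rw [h1, h2]; rfl
      by_cases hr : rest.any (fun k => (List.lookup k data1).isNone && (List.lookup k data2).isNone) = true
      · rw [if_pos hr, if_pos (hany.mpr (Or.inr hr))]
      · rw [if_neg hr, if_neg (fun hc => (hany.mp hc).elim
          (fun h => by rw [hcond] at h; exact Bool.false_ne_true h) hr)]
        rw [List.foldl_cons]
        simp [h1, h2, pvPick, PySem.Dict.insert_insert_self]

lemma foldl_insert_items (data1 data2 : List (String × String)) :
    (List.foldl (fun a k => a.insert k (pvPick data1 data2 k)) PySem.Dict.empty
        ["host", "port", "user", "password", "database"]).items =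
      ["host", "port", "user", "password", "database"].map (fun k => (k, pvPick data1 data2 k)) := by
  have h := PySem.Dict.items_foldl_insert_fresh
      (l := ["host", "port", "user", "password", "database"])
      (k := fun x => x) (v := pvPick data1 data2) (d := PySem.Dict.empty)
      (by intro a _; simp) (by decide)
  simpa using h

-- lookups through setdefault: the existing binding wins
lemma get?_setdefault_gen (d : PySem.Dict String String) (k₀ v₀ k : String) :
    (d.setdefault k₀ v₀).get? k = (d.get? k).or (if k = k₀ then some v₀ else none) := by
  by_cases hc : d.contains k₀ = true
  · rw [PySem.Dict.setdefault_of_contains d v₀ hc]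
    by_cases hk : k = k₀
    · subst hk
      rw [PySem.Dict.contains_eq_isSome_get?] at hc
      cases h : d.get? k
      · rw [h] at hc; simp at hc
      · simp
    · simp [hk]
  · rw [PySem.Dict.setdefault_of_not_contains d v₀ (by simpa using hc),
        PySem.Dict.get?_insert]
    by_cases hk : k = k₀
    · subst hk
      rw [PySem.Dict.contains_eq_isSome_get?] at hc
      cases h : d.get? k
      · simp
      · rw [h] at hc; simp at hc
    · simp [hk]

-- the scan's lookups: existing bindings win, then first match in the scanned source (needed keys only)
lemma get?_scan (src : List (String × String)) :
    ∀ (d : PySem.Dict String String) (k : String),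
      (src.foldl pvStep d).get? k =
        (d.get? k).or (if k ∈ pvNeeded then List.lookup k src else none) := by
  induction src with
  | nil => intro d k; by_cases hk : k ∈ pvNeeded <;> simp [hk, List.lookup]
  | cons p rest ih =>
    intro d k
    rw [List.foldl_cons, ih]
    unfold pvStep
    by_cases hp : p.1 ∈ pvNeeded
    · rw [if_pos hp, get?_setdefault_gen]
      by_cases hk : k ∈ pvNeeded
      · simp only [if_pos hk]
        obtain ⟨a, b⟩ := p
        have hl : List.lookup k ((a, b) :: rest) = if k = a then some b else List.lookup k rest := by
          by_cases h : k = a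
          · simp [List.lookup, h]
          · rw [if_neg h];
            show (match k == a with | true => some b | false => List.lookup k rest) = _
            rw [show (k == a) = false from beq_eq_false_iff_ne.mpr h]
        rw [hl]
        by_cases he : k = a
        · simp [he]
        · simp [he]
      · have hne : k ≠ p.1 := fun h => hk (h ▸ hp)
        simp [hk, hne]
    · rw [if_neg hp]
      by_cases hk : k ∈ pvNeeded
      · have hne : (k == p.1) = false := by
          simp only [beq_eq_false_iff_ne]; intro h; exact hp (h ▸ hk)
        obtain ⟨a, b⟩ := p
        have hl : List.lookup k ((a, b) :: rest) = List.lookup k rest := by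
          simp [List.lookup, hne]
        simp [hk, hl]
      · simp [hk]

-- every key of the scanned dict came from d or is a needed key
lemma keys_scan_subset (src : List (String × String)) :
    ∀ (d : PySem.Dict String String) (k : String),
      k ∈ (src.foldl pvStep d).keys → k ∈ d.keys ∨ k ∈ pvNeeded := by
  induction src with
  | nil => intro d k h; exact Or.inl h
  | cons p rest ih =>
    intro d k h
    rw [List.foldl_cons] at h
    rcases ih (pvStep d p) k h with hm | hm
    · unfold pvStep at hm
      by_cases hp : p.1 ∈ pvNeeded
      · rw [if_pos hp] at hm
        by_cases hc : d.contains p.1 = true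
        · rw [PySem.Dict.setdefault_of_contains d p.2 hc] at hm; exact Or.inl hm
        · rw [PySem.Dict.setdefault_of_not_contains d p.2 (by simpa using hc)] at hm
          rcases (PySem.Dict.mem_keys_insert _ _ _ _).mp hm with h | h
          · exact Or.inr (h ▸ hp)
          · exact Or.inl h
      · rw [if_neg hp] at hm; exact Or.inl hm
    · exact Or.inr hm

-- the scan keeps keys unique
lemma nodup_keys_scan (src : List (String × String)) :
    ∀ (d : PySem.Dict String String), d.keys.Nodup → (src.foldl pvStep d).keys.Nodup := by
  induction src with
  | nil => intro d h; exact h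
  | cons p rest ih =>
    intro d h
    rw [List.foldl_cons]
    apply ih
    unfold pvStep
    by_cases hp : p.1 ∈ pvNeeded
    · rw [if_pos hp]
      by_cases hc : d.contains p.1 = true
      · rw [PySem.Dict.setdefault_of_contains d p.2 hc]; exact h
      · rw [PySem.Dict.setdefault_of_not_contains d p.2 (by simpa using hc)]
        exact PySem.Dict.nodup_keys_insert _ _ _ h
    · rw [if_neg hp]; exact h

-- ===== VERDICT =====
theorem purgeData_spec : Claim_equal_purgeData := by
  intro data1 data2 _
  unfold Spec_purgeData purgeData purgeData_alt
  rw [purgeGoA_eq]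
  set found := data1.foldl pvStep (data2.foldl pvStep PySem.Dict.empty) with hfound
  have hget : ∀ k, k ∈ pvNeeded →
      found.get? k = (List.lookup k data2).or (List.lookup k data1) := by
    intro k hk
    rw [hfound, get?_scan, get?_scan, if_pos hk, if_pos hk]
    simp
  have hsub : ∀ k, k ∈ found.keys → k ∈ pvNeeded := by
    intro k h
    rcases keys_scan_subset data1 _ k h with h' | h'
    · rcases keys_scan_subset data2 _ k h' with h'' | h''
      · simp [PySem.Dict.keys_empty] at h''
      · exact h''
    · exact h'
  have hnd : found.keys.Nodup :=
    nodup_keys_scan data1 _ (nodup_keys_scan data2 _ (by simp [PySem.Dict.keys_empty]))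
  by_cases hmiss : (["host", "port", "user", "password", "database"].any
      (fun k => (List.lookup k data1).isNone && (List.lookup k data2).isNone)) = true
  · -- some needed key k* missing from both: found lacks k*, so |found| ≤ 4 < 5
    rw [if_pos hmiss]
    rcases List.any_eq_true.mp hmiss with ⟨k₀, hk₀, hk₀m⟩
    have hk₀n : k₀ ∈ pvNeeded := hk₀
    have hnot : k₀ ∉ found.keys := by
      intro hkin
      have := hget k₀ hk₀n
      rcases h1 : List.lookup k₀ data1 with _|v <;> rcases h2 : List.lookup k₀ data2 with _|v'
      · rw [h1, h2] at this; simp at this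
        exact (PySem.Dict.get?_eq_none_iff_not_mem_keys _ _).mp this hkin
      all_goals (rw [h1, h2] at hk₀m; simp at hk₀m)
    have hsub' : found.keys ⊆ pvNeeded.erase k₀ := by
      intro k hk
      have hne : k ≠ k₀ := fun h => hnot (h ▸ hk)
      exact (List.mem_erase_of_ne hne).mpr (hsub k hk)
    have hle : found.keys.length ≤ (pvNeeded.erase k₀).length :=
      (hnd.subperm hsub').length_le
    have hlen : (pvNeeded.erase k₀).length = 4 := by
      fin_cases hk₀n <;> decide
    have hsize : found.size < pvNeeded.length := by
      have h5 : pvNeeded.length = 5 := by decide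
      have : found.size = found.keys.length := by
        simp [PySem.Dict.size, PySem.Dict.keys]
      omega
    rw [if_pos hsize]
    rfl
  · -- no key missing: every needed key present, so |found| = 5 and the maps agree
    rw [if_neg hmiss]
    have hpres : ∀ k ∈ pvNeeded, k ∈ found.keys := by
      intro k hk
      have hnm : ¬ ((List.lookup k data1).isNone && (List.lookup k data2).isNone) = true := by
        intro h; exact hmiss (List.any_eq_true.mpr ⟨k, hk, h⟩)
      have : found.get? k ≠ none := by
        rw [hget k hk]
        rcases h1 : List.lookup k data1 with _|v <;> rcases h2 : List.lookup k data2 with _|v'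
        · exact absurd (by rw [h1, h2]; rfl) hnm
        all_goals simp
      by_contra hkin
      exact this ((PySem.Dict.get?_eq_none_iff_not_mem_keys _ _).mpr hkin)
    have hge : pvNeeded.length ≤ found.keys.length :=
      (List.Nodup.subperm (by decide) hpres).length_le
    have hsize : ¬ found.size < pvNeeded.length := by
      have : found.size = found.keys.length := by
        simp [PySem.Dict.size, PySem.Dict.keys]
      omega
    rw [if_neg hsize]
    rw [foldl_insert_items data1 data2]
    apply List.map_congr_left
    intro k hk
    have hnm : ¬ ((List.lookup k data1).isNone && (List.lookup k data2).isNone) = true := by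
      intro h; exact hmiss (List.any_eq_true.mpr ⟨k, hk, h⟩)
    have hgd : found.getD k "" = (found.get? k).getD "" := PySem.Dict.getD_eq_get?_getD _ _ _
    rw [hgd, hget k hk]
    rcases h1 : List.lookup k data1 with _|v <;> rcases h2 : List.lookup k data2 with _|v'
    · exact absurd (by rw [h1, h2]; rfl) hnm
    all_goals simp [pvPick, h1, h2]
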